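-- pv_equiv track=rewrite | github.com/rmn-gr/seminars_python | second_hard_task.py | readable_check_statement
-- ===== SOURCE A (Python) =====
-- def readable_check_statement(predicates):
--     left_result = False
--     right_result = False
--     iterator = 0
--     while iterator < len(predicates) - 1:
--         left_result = predicates[iterator] and predicates[iterator + 1]
--         iterator += 1
--     left_result = not left_result
--
--     iterator = 0
--     while iterator < len(predicates) - 1:
--         right_result = not (predicates[iterator]) or not (predicates[iterator + 1])
--         iterator += 1
--
--     return left_result == right_result
-- ===== SOURCE B (Python) =====
-- def readable_check_statement(predicates):
--     # Both of A's loops keep only their final iteration; for len >= 2 the two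
--     # sides are De Morgan equivalents (always equal), and for len < 2 the
--     # comparison is True == False. So the whole function is just this test:
--     return len(predicates) >= 2
-- ===== Notes on version B (the rewrite author's own statement) =====
-- stated objective: simpler
-- what changed: Both loops in A only retain their last iteration and the two retained values are De Morgan equivalents, so the whole computation collapses to the closed form len(predicates) >= 2 with no loops or indexing.
import Mathlib
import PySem

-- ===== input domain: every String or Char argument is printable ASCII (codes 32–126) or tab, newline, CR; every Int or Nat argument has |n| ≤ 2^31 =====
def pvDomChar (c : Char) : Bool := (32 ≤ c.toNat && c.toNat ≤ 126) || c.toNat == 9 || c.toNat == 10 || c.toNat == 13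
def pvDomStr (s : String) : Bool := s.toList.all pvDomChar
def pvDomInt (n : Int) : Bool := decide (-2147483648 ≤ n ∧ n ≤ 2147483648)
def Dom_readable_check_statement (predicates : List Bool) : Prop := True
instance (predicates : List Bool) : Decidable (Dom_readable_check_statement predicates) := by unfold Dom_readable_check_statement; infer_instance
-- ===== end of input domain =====

-- ===== PORT A =====
-- Port of A: two while-loops over iterator in range(0, len-1), each overwriting
-- its accumulator; indexing predicates[i] / predicates[i+1] is always in range
-- on these indices, ported exactly with pyGetD.
def readable_check_statement (predicates : List Bool) : Bool :=
  let n : Int := predicates.length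
  let left_result : Bool :=
    (PySem.List.pyRange 0 (n - 1) 1).foldl
      (fun _ i => PySem.List.pyGetD predicates i false && PySem.List.pyGetD predicates (i + 1) false)
      false
  let left_result := !left_result
  let right_result : Bool :=
    (PySem.List.pyRange 0 (n - 1) 1).foldl
      (fun _ i => !PySem.List.pyGetD predicates i false || !PySem.List.pyGetD predicates (i + 1) false)
      false
  left_result == right_result

-- ===== PORT B =====
def readable_check_statement_alt (predicates : List Bool) : Bool :=
  decide (2 ≤ predicates.length)

-- ===== PRECONDITION & SPEC =====
def Spec_readable_check_statement (predicates : List Bool) (out : Bool) : Prop := out = readable_check_statement_alt predicates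
instance (predicates : List Bool) (out : Bool) : Decidable (Spec_readable_check_statement predicates out) := by unfold Spec_readable_check_statement; infer_instance

-- ===== CLAIM (what is proved, stated in full; the proofs are below) =====
def Claim_equal_readable_check_statement : Prop := ∀ (predicates : List Bool), Dom_readable_check_statement predicates → Spec_readable_check_statement predicates (readable_check_statement predicates)

-- ===== LEMMAS AND PROOFS =====

-- ===== VERDICT (by name: the statement is the Claim_ definition above) =====
-- A loop whose body ignores the accumulator keeps only its final iteration.
theorem foldl_const_last {a b : Type} (f : a → b) :
    ∀ (l : List a) (init : b), l.foldl (fun _ x => f x) init = (l.map f).getLastD init := by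
  intro l
  induction l with
  | nil => intro init; rfl
  | cons x xs ih =>
      intro init
      rw [List.foldl_cons, ih (f x), List.map_cons, List.getLastD_cons]

theorem range_last (n : Int) (h : 2 ≤ n) :
    PySem.List.pyRange 0 (n - 1) 1 = PySem.List.pyRange 0 (n - 2) 1 ++ [n - 2] := by
  have := PySem.List.pyRange_one_succ_right (a := 0) (b := n - 2) (by omega)
  have hn : n - 2 + 1 = n - 1 := by ring
  rwa [hn] at this

theorem readable_check_statement_spec : Claim_equal_readable_check_statement := by
  unfold Claim_equal_readable_check_statement
  intro predicates _
  unfold Spec_readable_check_statement readable_check_statement readable_check_statement_alt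
  simp only []
  by_cases h : 2 ≤ predicates.length
  · have h2 : 2 ≤ (predicates.length : Int) := by exact_mod_cast h
    rw [range_last _ h2]
    simp only [foldl_const_last, List.map_append, List.getLastD_concat, List.map]
    have := h2
    cases PySem.List.pyGetD predicates ((predicates.length : Int) - 2) false <;>
      cases PySem.List.pyGetD predicates ((predicates.length : Int) - 2 + 1) false <;>
        simp [h]
  · have : (predicates.length : Int) - 1 ≤ 0 := by omega
    rw [PySem.List.pyRange_one_eq_nil this]
    simp [h]
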